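-- pv_equiv track=rewrite | github.com/mzurkashef/AI-Newsletter | src/main.py | _is_error_page
-- ===== SOURCE A (Python) =====
-- def _is_error_page(title: str) -> bool:
--     """Check if title indicates an error or blocked page."""
--     error_keywords = [
--         'blocked',
--         'unable to access',
--         'not found',
--         'error',
--         'forbidden',
--         'page does not exist',
--         'does not exist',
--         '404',
--         '403',
--         '500',
--         'access denied',
--     ]
--     title_lower = title.lower()
--     return any(keyword in title_lower for keyword in error_keywords)
-- ===== SOURCE B (Python) =====
-- ERROR_KEYWORDS = (
--     'blocked',
--     'unable to access',
--     'not found',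
--     'error',
--     'forbidden',
--     'page does not exist',
--     'does not exist',
--     '404',
--     '403',
--     '500',
--     'access denied',
-- )
--
-- def _is_error_page(title: str) -> bool:
--     """Check if title indicates an error or blocked page."""
--     t = title.lower()
--     for i in range(len(t) + 1):
--         for k in ERROR_KEYWORDS:
--             if t.startswith(k, i):
--                 return True
--     return False
-- ===== Notes on version B (the rewrite author's own statement) =====
-- stated objective: alternative
-- what changed: B makes a single left-to-right scan over the lowered title, testing at each position whether some keyword starts there, instead of A's per-keyword full-string substring searches.
import Mathlib
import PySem

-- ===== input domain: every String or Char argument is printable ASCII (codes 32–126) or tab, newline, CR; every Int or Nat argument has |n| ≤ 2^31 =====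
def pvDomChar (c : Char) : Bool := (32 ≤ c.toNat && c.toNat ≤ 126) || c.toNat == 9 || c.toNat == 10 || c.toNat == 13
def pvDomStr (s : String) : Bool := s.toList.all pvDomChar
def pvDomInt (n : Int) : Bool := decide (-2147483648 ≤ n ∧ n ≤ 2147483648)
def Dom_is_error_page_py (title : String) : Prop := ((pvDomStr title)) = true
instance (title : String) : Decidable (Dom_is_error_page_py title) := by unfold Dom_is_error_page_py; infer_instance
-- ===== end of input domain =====

-- B makes a single left-to-right scan over the lowered title, testing at each
-- position whether some keyword starts there, instead of A's per-keyword
-- substring searches; same return value (objective: alternative).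

-- ===== PORT A =====
def pvErrorKeywordsA : List String :=
  ["blocked", "unable to access", "not found", "error", "forbidden",
   "page does not exist", "does not exist", "404", "403", "500", "access denied"]

def is_error_page_py (title : String) : Bool :=
  pvErrorKeywordsA.any (fun k => PySem.Str.isIn k (PySem.Str.lower title))

-- ===== PORT B =====
def pvErrorKeywordsB : List String :=
  ["blocked", "unable to access", "not found", "error", "forbidden",
   "page does not exist", "does not exist", "404", "403", "500", "access denied"]

-- the loop 'for i in range(len(t)+1): for k in …: if t.startswith(k, i)', as
-- structural recursion over the suffixes of t (t.startswith(k, i) = startswith (t.drop i) k)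
def pvScanB (kws : List String) : List Char → Bool
  | [] => kws.any (fun k => PySem.Chars.startswith [] k.toList)
  | c :: rest =>
      kws.any (fun k => PySem.Chars.startswith (c :: rest) k.toList) || pvScanB kws rest

def is_error_page_py_alt (title : String) : Bool :=
  pvScanB pvErrorKeywordsB (PySem.Str.lower title).toList

-- ===== PRECONDITION & SPEC =====
def Spec_is_error_page_py (title : String) (out : Bool) : Prop := out = is_error_page_py_alt title
instance (title : String) (out : Bool) : Decidable (Spec_is_error_page_py title out) := by unfold Spec_is_error_page_py; infer_instance

-- ===== CLAIM (what is proved, stated in full; the proofs are below) =====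
def Claim_equal_is_error_page_py : Prop := ∀ (title : String), Dom_is_error_page_py title → Spec_is_error_page_py title (is_error_page_py title)

-- ===== LEMMAS AND PROOFS =====

-- per-keyword step: an infix of c :: rest is a prefix there or an infix of rest
theorem pv_isIn_cons (p : List Char) (c : Char) (rest : List Char) :
    PySem.Chars.isIn p (c :: rest) =
      (PySem.Chars.startswith (c :: rest) p || PySem.Chars.isIn p rest) := by
  rw [Bool.eq_iff_iff]
  simp [PySem.Chars.isIn_iff_infix, PySem.Chars.startswith_iff, List.infix_cons_iff]

theorem pv_isIn_nil (p : List Char) :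
    PySem.Chars.isIn p ([] : List Char) = PySem.Chars.startswith [] p := by
  rw [Bool.eq_iff_iff]
  simp [PySem.Chars.isIn_iff_infix, PySem.Chars.startswith_iff]

-- the scan computes 'some keyword occurs as a substring'
theorem pvScanB_eq (kws : List String) (cs : List Char) :
    pvScanB kws cs = kws.any (fun k => PySem.Chars.isIn k.toList cs) := by
  induction cs with
  | nil => simp [pvScanB, pv_isIn_nil]
  | cons c rest ih =>
      simp only [pvScanB, ih, pv_isIn_cons]
      rw [Bool.eq_iff_iff]
      simp only [Bool.or_eq_true, List.any_eq_true]
      constructor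
      · rintro (⟨k, hk, h⟩ | ⟨k, hk, h⟩)
        · exact ⟨k, hk, Or.inl h⟩
        · exact ⟨k, hk, Or.inr h⟩
      · rintro ⟨k, hk, h | h⟩
        · exact Or.inl ⟨k, hk, h⟩
        · exact Or.inr ⟨k, hk, h⟩

-- ===== VERDICT (by name: the statement is the Claim_ definition above) =====
theorem is_error_page_py_spec : Claim_equal_is_error_page_py := by
  intro title _
  show is_error_page_py title = is_error_page_py_alt title
  simp only [is_error_page_py, is_error_page_py_alt, pvScanB_eq,
    pvErrorKeywordsA, pvErrorKeywordsB, PySem.Str.isIn_eq]
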